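-- pv_equiv track=rewrite | github.com/0SU2/mining-class | 2025_EJ_MD_practica/programa_02.py | tab_cot
-- ===== SOURCE A (Python) =====
-- def tab_cot(values_1:list, values_2:list):
--     # Formar la tabla de contingencia
--     c_t = {}
--     for x, y in zip(values_1,values_2):
--         if x not in c_t: # Si aun no esta definida en el diccionario
--             c_t[x] = {}
--             # agregar los 3 tipos
--             c_t[x]['Alto'] = 0
--             c_t[x]['Medio'] = 0
--             c_t[x]['Bajo'] = 0
--         c_t[x][y] = c_t[x].get(y,0) + 1
--     return c_t
-- ===== SOURCE B (Python) =====
-- def tab_cot(values_1: list, values_2: list):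
--     # Stage 1: group the y-values by their x label (first-appearance order of x kept).
--     groups = {}
--     for x, y in zip(values_1, values_2):
--         groups.setdefault(x, []).append(y)
--     # Stage 2: build each row independently from its group.
--     c_t = {}
--     for x, ys in groups.items():
--         counts = {}
--         for y in ys:
--             counts[y] = counts.get(y, 0) + 1
--         cols = ['Alto', 'Medio', 'Bajo']
--         for y in counts:
--             if y not in cols:
--                 cols.append(y)
--         c_t[x] = {c: counts.get(c, 0) for c in cols}
--     return c_t
-- ===== Notes on version B (the rewrite author's own statement) =====
-- stated objective: alternative
-- what changed: B replaces A's single incremental pass of nested-dict updates by a group-by decomposition: stage 1 groups the y-values by their x label via setdefault/append, stage 2 builds each row independently from its group by counting y occurrences and laying out the column labels, so no nested dict is ever updated incrementally.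
import Mathlib
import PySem

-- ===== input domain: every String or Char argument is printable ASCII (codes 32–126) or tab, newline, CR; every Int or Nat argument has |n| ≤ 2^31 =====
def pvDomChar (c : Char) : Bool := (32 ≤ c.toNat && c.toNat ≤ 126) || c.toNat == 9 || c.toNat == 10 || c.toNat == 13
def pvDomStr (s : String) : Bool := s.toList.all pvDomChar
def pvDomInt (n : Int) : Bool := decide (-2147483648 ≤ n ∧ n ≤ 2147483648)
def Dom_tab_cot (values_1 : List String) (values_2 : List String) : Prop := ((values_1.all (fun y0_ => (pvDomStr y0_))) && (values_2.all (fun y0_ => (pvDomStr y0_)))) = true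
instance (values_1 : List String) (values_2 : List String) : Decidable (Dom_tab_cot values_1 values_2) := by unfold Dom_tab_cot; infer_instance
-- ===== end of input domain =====

-- B builds the contingency table by a group-by decomposition (distinct row labels first, then
-- each row built independently by listing its columns and counting) instead of A's single
-- incremental pass of nested-dict updates; return values proved identical.

-- ===== PORT A =====
-- the {'Alto':0,'Medio':0,'Bajo':0} seeding of a new row
def pvSeed : PySem.Dict String Int :=
  ((PySem.Dict.empty.insert "Alto" (0 : Int)).insert "Medio" 0).insert "Bajo" 0

-- one iteration of A's loop body: seed the row of x if new, then bump c_t[x][y] by 1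
def pvStepA (d : PySem.Dict String (PySem.Dict String Int)) (xy : String × String) :
    PySem.Dict String (PySem.Dict String Int) :=
  let d := if d.contains xy.1 then d else d.insert xy.1 pvSeed
  let inner := d.getD xy.1 PySem.Dict.empty
  d.insert xy.1 (inner.insert xy.2 (inner.getD xy.2 0 + 1))

def tab_cot (values_1 : List String) (values_2 : List String) : List (String × List (String × Int)) :=
  let c_t := (values_1.zip values_2).foldl pvStepA PySem.Dict.empty
  c_t.items.map (fun kv => (kv.1, kv.2.items))

-- ===== PORT B =====
def tab_cot_alt (values_1 : List String) (values_2 : List String) : List (String × List (String × Int)) :=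
  let pairs := values_1.zip values_2
  -- stage 1: group the y-values by their x label (groups.setdefault(x, []).append(y))
  let groups := pairs.foldl (fun g p => g.modify p.1 [] (fun v => v ++ [p.2])) PySem.Dict.empty
  -- stage 2: build each row independently from its group
  let c_t := groups.items.foldl
    (fun d kv =>
      let counts := kv.2.foldl (fun cnt y => cnt.insert y (cnt.getD y 0 + 1)) PySem.Dict.empty
      let cols := counts.keys.foldl (fun cs y => if y ∈ cs then cs else cs ++ [y]) ["Alto", "Medio", "Bajo"]
      d.insert kv.1 (cols.foldl (fun r c => r.insert c (counts.getD c 0)) PySem.Dict.empty))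
    PySem.Dict.empty
  c_t.items.map (fun kv => (kv.1, kv.2.items))

-- ===== PRECONDITION & SPEC =====
def Spec_tab_cot (values_1 : List String) (values_2 : List String) (out : List (String × List (String × Int))) : Prop := out = tab_cot_alt values_1 values_2
instance (values_1 : List String) (values_2 : List String) (out : List (String × List (String × Int))) : Decidable (Spec_tab_cot values_1 values_2 out) := by unfold Spec_tab_cot; infer_instance

-- ===== CLAIM (what is proved, stated in full; the proofs are below) =====
def Claim_equal_tab_cot : Prop := ∀ (values_1 : List String) (values_2 : List String), Dom_tab_cot values_1 values_2 → Spec_tab_cot values_1 values_2 (tab_cot values_1 values_2)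

-- ===== LEMMAS AND PROOFS =====

-- the y-values of the pairs whose first component is x
def pvYs (l : List (String × String)) (x : String) : List String :=
  (l.filter (fun q => q.1 == x)).map Prod.snd

-- the inner dict A's loop would start the row of x from
def pvStart (d : PySem.Dict String (PySem.Dict String Int)) (x : String) : PySem.Dict String Int :=
  if d.contains x then d.getD x PySem.Dict.empty else pvSeed

-- the bump of one y in A's inner dict
def pvBump (r : PySem.Dict String Int) (y : String) : PySem.Dict String Int :=
  r.insert y (r.getD y 0 + 1)

-- the column labels of the row with y-values ys
def pvCols (ys : List String) : List String := PySem.Set.update ["Alto", "Medio", "Bajo"] ys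

theorem pvSeed_getD (c : String) : pvSeed.getD c 0 = 0 := by
  simp only [pvSeed, PySem.Dict.getD_insert]
  split_ifs <;> simp [PySem.Dict.getD_empty]

theorem keys_pvStepA (d : PySem.Dict String (PySem.Dict String Int)) (p : String × String) :
    (pvStepA d p).keys = PySem.Set.add d.keys p.1 := by
  simp only [pvStepA]
  by_cases h : d.contains p.1 = true
  · rw [if_pos h, PySem.Dict.keys_insert_of_contains _ _ h,
      PySem.Set.add_of_mem ((PySem.Dict.contains_iff_mem_keys d p.1).mp h)]
  · have h' : d.contains p.1 = false := by simpa using h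
    rw [if_neg (by simp [h']), PySem.Dict.keys_insert_of_contains _ _ (by simp),
      PySem.Dict.keys_insert_of_not_contains _ _ h',
      PySem.Set.add_of_not_mem (fun hm => by simp [(PySem.Dict.contains_iff_mem_keys d p.1).mpr hm] at h')]

theorem pvKeysA (l : List (String × String)) (d : PySem.Dict String (PySem.Dict String Int)) :
    (l.foldl pvStepA d).keys = PySem.Set.update d.keys (l.map Prod.fst) := by
  induction l generalizing d with
  | nil => rfl
  | cons p rest ih =>
    rw [List.foldl_cons, ih, List.map_cons, PySem.Set.update_cons, keys_pvStepA]

theorem contains_pvStepA (d : PySem.Dict String (PySem.Dict String Int)) (p : String × String) (x : String) :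
    (pvStepA d p).contains x = (x == p.1 || d.contains x) := by
  simp only [pvStepA]
  split
  · simp [PySem.Dict.contains_insert]
  · simp [PySem.Dict.contains_insert]

theorem get?_pvStepA_of_ne (d : PySem.Dict String (PySem.Dict String Int)) (p : String × String)
    (x : String) (h : x ≠ p.1) : (pvStepA d p).get? x = d.get? x := by
  simp only [pvStepA]
  split
  · rw [PySem.Dict.get?_insert_of_ne _ _ h]
  · rw [PySem.Dict.get?_insert_of_ne _ _ h, PySem.Dict.get?_insert_of_ne _ _ h]

theorem start_pvStepA_self (d : PySem.Dict String (PySem.Dict String Int)) (p : String × String) :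
    pvStart (pvStepA d p) p.1 = pvBump (pvStart d p.1) p.2 := by
  simp only [pvStart, pvStepA, pvBump]
  by_cases h : d.contains p.1 = true
  · simp [h]
  · have h' : d.contains p.1 = false := by simpa using h
    simp [h']

theorem start_pvStepA_of_ne (d : PySem.Dict String (PySem.Dict String Int)) (p : String × String)
    (x : String) (h : x ≠ p.1) : pvStart (pvStepA d p) x = pvStart d x := by
  have hb : (x == p.1) = false := by simpa using h
  simp only [pvStart, contains_pvStepA, hb, Bool.false_or,
    PySem.Dict.getD_eq_get?_getD, get?_pvStepA_of_ne d p x h]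

-- A's state after processing l: the row of every label x seen so far is the bump-fold of its y-values
theorem pvGetA (l : List (String × String)) (d : PySem.Dict String (PySem.Dict String Int))
    (x : String) (h : x ∈ l.map Prod.fst ∨ d.contains x = true) :
    (l.foldl pvStepA d).get? x = some ((pvYs l x).foldl pvBump (pvStart d x)) := by
  induction l generalizing d with
  | nil =>
    have hc : d.contains x = true := by simpa using h
    have : d.get? x = some (d.getD x PySem.Dict.empty) := by
      rw [PySem.Dict.contains_eq_isSome_get?] at hc
      cases hg : d.get? x with
      | none => rw [hg] at hc; simp at hc
      | some v => rw [PySem.Dict.getD_eq_get?_getD, hg]; rfl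
    simpa [pvYs, pvStart, hc] using this
  | cons p rest ih =>
    rw [List.foldl_cons]
    by_cases hx : x = p.1
    · have hpx : (p.1 == x) = true := by simp [hx]
      rw [ih (pvStepA d p) (Or.inr (by simp [contains_pvStepA, hx]))]
      have hys : pvYs (p :: rest) x = p.2 :: pvYs rest x := by
        simp [pvYs, hpx]
      rw [hys, List.foldl_cons, hx, start_pvStepA_self, ← hx]
    · have h' : x ∈ rest.map Prod.fst ∨ (pvStepA d p).contains x = true := by
        rcases h with hm | hc
        · rcases (by simpa using hm : x = p.1 ∨ x ∈ rest.map Prod.fst) with he | hm'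
          · exact absurd he hx
          · exact Or.inl hm'
        · exact Or.inr (by simp [contains_pvStepA, hc])
      rw [ih (pvStepA d p) h', start_pvStepA_of_ne d p x hx]
      have hpx : (p.1 == x) = false := by simp; exact fun he => hx he.symm
      have hys : pvYs (p :: rest) x = pvYs rest x := by
        simp [pvYs, hpx]
      rw [hys]

-- the ordered-dedup loop is Set.add pointwise
theorem pvDedupAdd : (fun (acc : List String) (y : String) => if y ∈ acc then acc else acc ++ [y]) = PySem.Set.add := by
  funext acc y; rw [PySem.Set.add_eq_ite]

-- the row A builds for x: its items are one count per column label
theorem pvRowA_items (ys : List String) :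
    (ys.foldl pvBump pvSeed).items = (pvCols ys).map (fun c => (c, (ys.count c : Int))) := by
  have hfold : ys.foldl pvBump pvSeed = ys.foldl (fun r y => r.insert y (r.getD y 0 + 1)) pvSeed := rfl
  have hkeys : (ys.foldl pvBump pvSeed).keys = pvCols ys := by
    rw [hfold, PySem.Dict.keys_foldl_insert]; rfl
  have hnd : (ys.foldl pvBump pvSeed).keys.Nodup := by
    rw [hkeys]; exact PySem.Set.nodup_update _ _ (by decide)
  rw [PySem.Dict.items_eq_map_keys _ hnd 0, hkeys]
  apply List.map_congr_left
  intro c hc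
  rw [hfold, PySem.Dict.getD_foldl_insert_add_one, pvSeed_getD, zero_add]

-- the counts dict B builds from the group ys
def pvCnt (ys : List String) : PySem.Dict String Int :=
  ys.foldl (fun cnt y => cnt.insert y (cnt.getD y 0 + 1)) PySem.Dict.empty

-- the row B builds from the group ys: also one count per column label
theorem pvRowB_items (ys : List String) :
    (((pvCnt ys).keys.foldl (fun cs y => if y ∈ cs then cs else cs ++ [y]) ["Alto", "Medio", "Bajo"]).foldl
      (fun r c => r.insert c ((pvCnt ys).getD c 0)) PySem.Dict.empty).items
    = (pvCols ys).map (fun c => (c, (ys.count c : Int))) := by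
  have hcnt : pvCnt ys = PySem.Dict.counter ys :=
    PySem.Dict.foldl_insert_getD_add_one_eq_counter ys
  rw [hcnt, PySem.Dict.keys_counter, pvDedupAdd]
  have hcols : (PySem.Set.ofList ys).foldl PySem.Set.add ["Alto", "Medio", "Bajo"] = pvCols ys := by
    show PySem.Set.update ["Alto", "Medio", "Bajo"] (PySem.Set.ofList ys) = pvCols ys
    rw [PySem.Set.update_eq_append_filter, pvCols, PySem.Set.update_eq_append_filter,
      PySem.Set.ofList_ofList]
  rw [hcols]
  rw [PySem.Dict.items_foldl_insert_fresh (pvCols ys) (fun c => c)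
    (fun c => (PySem.Dict.counter ys).getD c 0) PySem.Dict.empty
    (fun a _ => PySem.Dict.contains_empty a)
    (by simpa using PySem.Set.nodup_update ["Alto", "Medio", "Bajo"] ys (by decide))]
  simp [PySem.Dict.getD_counter]
  rfl

theorem tab_cot_eq (v1 v2 : List String) : tab_cot v1 v2 = tab_cot_alt v1 v2 := by
  simp only [tab_cot, tab_cot_alt]
  set l := v1.zip v2 with hl
  -- A side: items are one row per label seen, in first-appearance order
  have hkeys : ((l.foldl pvStepA PySem.Dict.empty).keys) = PySem.Set.ofList (l.map Prod.fst) := by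
    rw [pvKeysA]; simp [PySem.Set.update_nil_left, PySem.Dict.keys_empty]
  have hnd : ((l.foldl pvStepA PySem.Dict.empty).keys).Nodup := by
    rw [hkeys]; exact PySem.Set.nodup_ofList _
  rw [PySem.Dict.items_eq_map_keys _ hnd PySem.Dict.empty, hkeys, List.map_map]
  -- B side: the groups dict maps each label x (same order) to pvYs l x
  have hgkeys : (l.foldl (fun g p => g.modify p.1 [] (fun v => v ++ [p.2])) PySem.Dict.empty).keys
      = PySem.Set.ofList (l.map Prod.fst) := by
    rw [PySem.Dict.keys_foldl_modify_key l Prod.fst [] (fun _ p v => v ++ [p.2]) PySem.Dict.empty]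
    simp [PySem.Set.update_nil_left, PySem.Dict.keys_empty]
  have hgnd : (l.foldl (fun g p => g.modify p.1 [] (fun v => v ++ [p.2])) PySem.Dict.empty).keys.Nodup := by
    exact PySem.Dict.nodup_keys_foldl_modify_key l Prod.fst [] (fun _ p v => v ++ [p.2])
      PySem.Dict.empty PySem.Dict.nodup_keys_empty
  have hgitems : (l.foldl (fun g p => g.modify p.1 [] (fun v => v ++ [p.2])) PySem.Dict.empty).items
      = (PySem.Set.ofList (l.map Prod.fst)).map (fun x => (x, pvYs l x)) := by
    rw [PySem.Dict.items_eq_map_keys _ hgnd [], hgkeys]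
    apply List.map_congr_left
    intro x _
    rw [PySem.Dict.getD_foldl_modify_append]
    simp [PySem.Dict.getD_empty, pvYs]
  simp only [hgitems]
  -- the reshaping loop of B inserts one fresh row per distinct label
  rw [PySem.Dict.items_foldl_insert_fresh
      ((PySem.Set.ofList (l.map Prod.fst)).map (fun x => (x, pvYs l x))) Prod.fst
      (fun kv => ((kv.2.foldl (fun cnt y => cnt.insert y (cnt.getD y 0 + 1))
            (PySem.Dict.empty : PySem.Dict String Int)).keys.foldl
          (fun cs y => if y ∈ cs then cs else cs ++ [y]) ["Alto", "Medio", "Bajo"]).foldl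
        (fun r c => r.insert c ((kv.2.foldl (fun cnt y => cnt.insert y (cnt.getD y 0 + 1))
            (PySem.Dict.empty : PySem.Dict String Int)).getD c 0))
        (PySem.Dict.empty : PySem.Dict String Int))
      PySem.Dict.empty (fun a _ => PySem.Dict.contains_empty a.1)
      (by rw [List.map_map]
          simp [Function.comp_def, PySem.Set.nodup_ofList])]
  rw [show (PySem.Dict.empty : PySem.Dict String (PySem.Dict String Int)).items = [] from rfl,
    List.nil_append, List.map_map, List.map_map]
  apply List.map_congr_left
  intro x hx
  have hxm : x ∈ l.map Prod.fst := (PySem.Set.mem_ofList _ x).mp hx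
  have hget := pvGetA l PySem.Dict.empty x (Or.inl hxm)
  have hstart : pvStart PySem.Dict.empty x = pvSeed := by
    simp [pvStart, PySem.Dict.contains_empty]
  rw [hstart] at hget
  simp only [Function.comp]
  rw [PySem.Dict.getD_of_get?_eq_some _ _ hget, pvRowA_items]
  exact congrArg _ (pvRowB_items (pvYs l x)).symm

-- ===== VERDICT (by name: the statement is the Claim_ definition above) =====
theorem tab_cot_spec : Claim_equal_tab_cot := by
  intro v1 v2 _
  exact tab_cot_eq v1 v2
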